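-- pv_equiv track=rewrite | github.com/William-D-Jones/advent-of-code-solutions | 2023/day5.py | rsplit
-- ===== SOURCE A (Python) =====
-- def rsplit(lconvert, rin):
--     lout = []
--     rnow = [rin]
--     while len(rnow) > 0:
--         for i,l in enumerate(lconvert):
--             dest, source, r = l
--             o = min([source + r, rnow[-1][1]]) - max([source, rnow[-1][0]])
--             if o > 0:
--                 rpop = rnow.pop()
--                 if rpop[0] < source:
--                     rnow.append([rpop[0], source])
--                     left = source
--                 else:
--                     left = rpop[0]
--                 if rpop[1] > source + r:
--                     rnow.append([source + r, rpop[1]])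
--                     right = source + r
--                 else:
--                     right = rpop[1]
--                 lout.append([left, right])
--                 break
--             if i == len(lconvert) - 1:
--                 rpop = rnow.pop()
--                 lout.append(rpop)
--     return lout
-- ===== SOURCE B (Python) =====
-- def rsplit(lconvert, rin):
--     def first_overlap(lo, hi):
--         for l in lconvert:
--             dest, source, r = l
--             if min(source + r, hi) - max(source, lo) > 0:
--                 return source, source + r
--         return None
--
--     def split(interval):
--         lo, hi = interval[0], interval[1]
--         ov = first_overlap(lo, hi)
--         if ov is None:
--             return [interval]
--         s, e = ov
--         pieces = [[max(lo, s), min(hi, e)]]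
--         if hi > e:
--             pieces += split([e, hi])
--         if lo < s:
--             pieces += split([lo, s])
--         return pieces
--
--     return split(rin)
-- ===== Notes on version B (the rewrite author's own statement) =====
-- stated objective: simpler
-- what changed: A's explicit worklist (a while-loop popping/appending a stack of intervals with an indexed inner for-loop and an i==len-1 sentinel) is replaced by a direct recursion on the interval: find the first overlapping mapping, emit the mapped middle, then recurse on the right and left remainders in that order.
-- outside the precondition, e.g. on rsplit([], [0, 5]): A does not finish within the time limit, B returns [[0, 5]]; on rsplit([[0, 0, 10], [0]], [0, 10]): A returns [[0, 10]], B returns [[0, 10]]; on rsplit([[0, 0, 3]], [5]): A raises IndexError, B raises IndexError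
import Mathlib
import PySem

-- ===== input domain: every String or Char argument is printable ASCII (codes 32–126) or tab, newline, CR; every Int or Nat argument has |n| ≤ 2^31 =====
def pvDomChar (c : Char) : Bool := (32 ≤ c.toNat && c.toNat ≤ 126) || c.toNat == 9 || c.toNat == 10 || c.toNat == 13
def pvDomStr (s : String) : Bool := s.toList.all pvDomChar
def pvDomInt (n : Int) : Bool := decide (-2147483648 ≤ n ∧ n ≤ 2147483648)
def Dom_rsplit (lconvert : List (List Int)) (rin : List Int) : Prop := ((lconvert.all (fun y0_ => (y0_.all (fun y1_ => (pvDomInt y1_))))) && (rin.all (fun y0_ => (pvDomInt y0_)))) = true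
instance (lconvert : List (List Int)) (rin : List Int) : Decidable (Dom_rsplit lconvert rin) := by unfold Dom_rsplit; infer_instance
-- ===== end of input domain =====

-- B replaces A's explicit interval worklist (while-loop popping/appending a stack, with an
-- indexed inner scan) by direct recursion on the interval: simpler, same cost.

-- Python t[i] for the nonnegative literal indices 0/1/2 both programs use; exact whenever
-- i < t.length, which Pre_rsplit guarantees for every access either Python performs.
def pvGetI (t : List Int) (i : Nat) : Int := t.getD i 0

-- the first-overlap scan both Pythons perform over lconvert (A inline in its for-loop, Source B
-- as the helper first_overlap): first row whose source interval overlaps [lo,hi), returned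
-- as (source, source + r); none when no row overlaps.
def firstOv (ls : List (List Int)) (lo hi : Int) : Option (Int × Int) :=
  match ls with
  | [] => none
  | l :: rest =>
      let source := pvGetI l 1
      let r := pvGetI l 2
      if 0 < min (source + r) hi - max source lo then some (source, source + r)
      else firstOv rest lo hi

-- ===== PORT A =====
-- A's while-loop; rnow is the stack with its TOP AT THE HEAD (Python appends/pops at the
-- end), lout the output accumulated so far.  The Nat argument is fuel that only makes the
-- recursion structural: 2*length(interval)+1 bounds the loop's iteration count, so inside
-- Pre_rsplit the fuel never runs out (loopF_flat below does not use the 0-branch).  When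
-- lconvert = [] the Python loop never terminates (the for body never runs, so nothing is
-- ever popped); that input is excluded by Pre_rsplit and the port returns lout there.
def rsplitLoopF (lconvert : List (List Int)) :
    Nat → List (List Int) → List (List Int) → List (List Int)
  | _, [], lout => lout
  | 0, _ :: _, lout => lout
  | f + 1, t :: rest, lout =>
      if lconvert = [] then lout
      else
        let lo := pvGetI t 0
        let hi := pvGetI t 1
        match firstOv lconvert lo hi with
        | none => rsplitLoopF lconvert f rest (lout ++ [t])
        | some (s, e) =>
            let leftPush : List (List Int) := if lo < s then [[lo, s]] else []
            let left : Int := if lo < s then s else lo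
            let rightPush : List (List Int) := if hi > e then [[e, hi]] else []
            let right : Int := if hi > e then e else hi
            rsplitLoopF lconvert f (rightPush ++ leftPush ++ rest) (lout ++ [[left, right]])

def rsplit (lconvert : List (List Int)) (rin : List Int) : List (List Int) :=
  rsplitLoopF lconvert (2 * (pvGetI rin 1 - pvGetI rin 0).toNat + 1) [rin] []


-- ===== PORT B =====
-- Source B's split: find the first overlapping mapping; emit the mapped middle, then recurse on
-- the right remainder, then on the left remainder.  The fuel (length(interval)+1 at top
-- level) again only makes the recursion structural; it never runs out on the calls made.
def rsplitRecF (lconvert : List (List Int)) : Nat → List Int → List (List Int)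
  | 0, t => [t]
  | f + 1, t =>
      let lo := pvGetI t 0
      let hi := pvGetI t 1
      match firstOv lconvert lo hi with
      | none => [t]
      | some (s, e) =>
          [[max lo s, min hi e]]
            ++ (if hi > e then rsplitRecF lconvert f [e, hi] else [])
            ++ (if lo < s then rsplitRecF lconvert f [lo, s] else [])

def rsplit_alt (lconvert : List (List Int)) (rin : List Int) : List (List Int) :=
  rsplitRecF lconvert ((pvGetI rin 1 - pvGetI rin 0).toNat + 1) rin

-- ===== PRECONDITION & SPEC =====
-- Pre_ excludes: empty lconvert, on which A's while-loop never terminates; lists with a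
-- mapping row that is not an exact (dest, source, range) triple, on which A raises
-- ValueError whenever that row is reached (a malformed row hidden behind an always-covering
-- earlier row is excluded with it, though A and B then agree); and rin with fewer than two
-- entries, on which A raises IndexError.
def Pre_rsplit (lconvert : List (List Int)) (rin : List Int) : Prop :=
  lconvert ≠ [] ∧ (∀ l ∈ lconvert, l.length = 3) ∧ 2 ≤ rin.length
instance (lconvert : List (List Int)) (rin : List Int) : Decidable (Pre_rsplit lconvert rin) := by
  unfold Pre_rsplit; infer_instance

def pvWitness_rsplit : List (List Int) × List Int := ([[10, 2, 5]], [1, 9])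

def Spec_rsplit (lconvert : List (List Int)) (rin : List Int) (out : List (List Int)) : Prop :=
  out = rsplit_alt lconvert rin
instance (lconvert : List (List Int)) (rin : List Int) (out : List (List Int)) :
    Decidable (Spec_rsplit lconvert rin out) := by unfold Spec_rsplit; infer_instance

-- ===== CLAIM (what is proved, stated in full; the proofs are below) =====
def Claim_equal_rsplit : Prop := ∀ (lconvert : List (List Int)) (rin : List Int),
  Dom_rsplit lconvert rin → Pre_rsplit lconvert rin → Spec_rsplit lconvert rin (rsplit lconvert rin)

-- ===== LEMMAS AND PROOFS =====

-- what a successful first-overlap scan guarantees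
lemma firstOv_pos {ls : List (List Int)} {lo hi s e : Int}
    (h : firstOv ls lo hi = some (s, e)) : 0 < min e hi - max s lo := by
  induction ls with
  | nil => simp [firstOv] at h
  | cons l rest ih =>
      simp only [firstOv] at h
      split at h
      · cases h; omega
      · exact ih h

-- fuel irrelevance for B's recursion, by strong induction on the interval length
lemma recF_congr (lconvert : List (List Int)) :
    ∀ (n : Nat) (t : List Int) (f1 f2 : Nat),
      (pvGetI t 1 - pvGetI t 0).toNat ≤ n →
      (pvGetI t 1 - pvGetI t 0).toNat < f1 → (pvGetI t 1 - pvGetI t 0).toNat < f2 →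
      rsplitRecF lconvert f1 t = rsplitRecF lconvert f2 t := by
  intro n
  induction n with
  | zero =>
      intro t f1 f2 hn h1 h2
      obtain ⟨a, rfl⟩ : ∃ a, f1 = a + 1 := ⟨f1 - 1, by omega⟩
      obtain ⟨b, rfl⟩ : ∃ b, f2 = b + 1 := ⟨f2 - 1, by omega⟩
      rw [rsplitRecF, rsplitRecF]
      cases ho : firstOv lconvert (pvGetI t 0) (pvGetI t 1) with
      | none => rfl
      | some p =>
          obtain ⟨s, e⟩ := p
          have hov : 0 < min e (pvGetI t 1) - max s (pvGetI t 0) := firstOv_pos ho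
          omega
  | succ n ih =>
      intro t f1 f2 hn h1 h2
      obtain ⟨a, rfl⟩ : ∃ a, f1 = a + 1 := ⟨f1 - 1, by omega⟩
      obtain ⟨b, rfl⟩ : ∃ b, f2 = b + 1 := ⟨f2 - 1, by omega⟩
      rw [rsplitRecF, rsplitRecF]
      cases ho : firstOv lconvert (pvGetI t 0) (pvGetI t 1) with
      | none => rfl
      | some p =>
          obtain ⟨s, e⟩ := p
          have hov : 0 < min e (pvGetI t 1) - max s (pvGetI t 0) := firstOv_pos ho
          have r0 : pvGetI [e, pvGetI t 1] 0 = e := rfl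
          have r1 : pvGetI [e, pvGetI t 1] 1 = pvGetI t 1 := rfl
          have l0 : pvGetI [pvGetI t 0, s] 0 = pvGetI t 0 := rfl
          have l1 : pvGetI [pvGetI t 0, s] 1 = s := rfl
          have eR : rsplitRecF lconvert a [e, pvGetI t 1]
              = rsplitRecF lconvert b [e, pvGetI t 1] :=
            ih _ a b (by rw [r0, r1]; omega) (by rw [r0, r1]; omega) (by rw [r0, r1]; omega)
          have eL : rsplitRecF lconvert a [pvGetI t 0, s]
              = rsplitRecF lconvert b [pvGetI t 0, s] :=
            ih _ a b (by rw [l0, l1]; omega) (by rw [l0, l1]; omega) (by rw [l0, l1]; omega)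
          simp only [eR, eL]

-- canonical B result for one interval
def recB (lconvert : List (List Int)) (t : List Int) : List (List Int) :=
  rsplitRecF lconvert ((pvGetI t 1 - pvGetI t 0).toNat + 1) t

-- fuel needed by A's loop for one stack entry
def needA (t : List Int) : Nat := 2 * (pvGetI t 1 - pvGetI t 0).toNat + 1

-- A's fueled loop, given enough fuel, appends B's result for every stack entry in order
lemma loopF_flat (lconvert : List (List Int)) (hcl : lconvert ≠ []) :
    ∀ (f : Nat) (rnow lout : List (List Int)),
      (rnow.map needA).sum ≤ f →
      rsplitLoopF lconvert f rnow lout = lout ++ (rnow.map (recB lconvert)).flatten := by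
  intro f
  induction f with
  | zero =>
      intro rnow lout hf
      cases rnow with
      | nil => simp [rsplitLoopF]
      | cons t rest => simp only [List.map_cons, List.sum_cons, needA] at hf; omega
  | succ f ih =>
      intro rnow lout hf
      cases rnow with
      | nil => simp [rsplitLoopF]
      | cons t rest =>
          simp only [List.map_cons, List.sum_cons, needA] at hf
          rw [rsplitLoopF]
          simp only [if_neg hcl]
          cases ho : firstOv lconvert (pvGetI t 0) (pvGetI t 1) with
          | none =>
              rw [ih rest (lout ++ [t]) (by omega)]
              have hB : recB lconvert t = [t] := by
                rw [recB, rsplitRecF]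
                simp [ho]
              simp [hB]
          | some p =>
              obtain ⟨s, e⟩ := p
              have hov : 0 < min e (pvGetI t 1) - max s (pvGetI t 0) := firstOv_pos ho
              have r0 : pvGetI [e, pvGetI t 1] 0 = e := rfl
              have r1 : pvGetI [e, pvGetI t 1] 1 = pvGetI t 1 := rfl
              have l0 : pvGetI [pvGetI t 0, s] 0 = pvGetI t 0 := rfl
              have l1 : pvGetI [pvGetI t 0, s] 1 = s := rfl
              -- B's children at fuel len are the canonical children
              have cR : rsplitRecF lconvert (pvGetI t 1 - pvGetI t 0).toNat [e, pvGetI t 1]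
                  = recB lconvert [e, pvGetI t 1] :=
                recF_congr lconvert ((pvGetI [e, pvGetI t 1] 1 - pvGetI [e, pvGetI t 1] 0).toNat)
                  _ _ _ le_rfl (by rw [r0, r1]; omega) (by omega)
              have cL : rsplitRecF lconvert (pvGetI t 1 - pvGetI t 0).toNat [pvGetI t 0, s]
                  = recB lconvert [pvGetI t 0, s] :=
                recF_congr lconvert ((pvGetI [pvGetI t 0, s] 1 - pvGetI [pvGetI t 0, s] 0).toNat)
                  _ _ _ le_rfl (by rw [l0, l1]; omega) (by omega)
              -- one unfolding of B's canonical result for t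
              have hB : recB lconvert t
                  = [[max (pvGetI t 0) s, min (pvGetI t 1) e]]
                    ++ (if pvGetI t 1 > e then recB lconvert [e, pvGetI t 1] else [])
                    ++ (if pvGetI t 0 < s then recB lconvert [pvGetI t 0, s] else []) := by
                rw [recB, rsplitRecF]
                simp only [ho]
                rw [cR, cL]
              by_cases h1 : pvGetI t 0 < s <;> by_cases h2 : pvGetI t 1 > e <;>
                simp only [h1, h2, ite_true, ite_false,
                  List.cons_append, List.nil_append, List.append_nil]
              · rw [ih ([e, pvGetI t 1] :: [pvGetI t 0, s] :: rest) (lout ++ [[s, e]])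
                    (by simp only [List.map_cons, List.sum_cons, needA, r0, r1, l0, l1]; omega)]
                conv_rhs => rw [List.map_cons, List.flatten_cons, hB]
                have hM : max (pvGetI t 0) s = s := by omega
                have hm : min (pvGetI t 1) e = e := by omega
                simp [h1, h2, hM, hm]
              · rw [ih ([pvGetI t 0, s] :: rest) (lout ++ [[s, pvGetI t 1]])
                    (by simp only [List.map_cons, List.sum_cons, needA, l0, l1]; omega)]
                conv_rhs => rw [List.map_cons, List.flatten_cons, hB]
                have hM : max (pvGetI t 0) s = s := by omega
                have hm : min (pvGetI t 1) e = pvGetI t 1 := by omega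
                simp [h1, h2, hM, hm]
              · rw [ih ([e, pvGetI t 1] :: rest) (lout ++ [[pvGetI t 0, e]])
                    (by simp only [List.map_cons, List.sum_cons, needA, r0, r1]; omega)]
                conv_rhs => rw [List.map_cons, List.flatten_cons, hB]
                have hM : max (pvGetI t 0) s = pvGetI t 0 := by omega
                have hm : min (pvGetI t 1) e = e := by omega
                simp [h1, h2, hM, hm]
              · rw [ih rest (lout ++ [[pvGetI t 0, pvGetI t 1]]) (by omega)]
                conv_rhs => rw [List.map_cons, List.flatten_cons, hB]
                have hM : max (pvGetI t 0) s = pvGetI t 0 := by omega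
                have hm : min (pvGetI t 1) e = pvGetI t 1 := by omega
                simp [h1, h2, hM, hm]

-- ===== VERDICT (by name: the statement is the Claim_ definition above) =====
theorem rsplit_spec : Claim_equal_rsplit := by
  intro lconvert rin _hdom hpre
  obtain ⟨hcl, -, -⟩ := hpre
  unfold Spec_rsplit rsplit rsplit_alt
  rw [loopF_flat lconvert hcl _ [rin] [] (by simp [needA])]
  simp [recB]
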